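-- pv_equiv track=rewrite | github.com/seokjoon911/codingtest | 프로그래머스/unrated/181874. A 강조하기/A 강조하기.py | solution
-- ===== SOURCE A (Python) =====
-- def solution(myString):
--     answer = ''
--
--     for c in myString:
--         if c.lower() == 'a':
--             answer += 'A'
--         else:
--             answer += c.lower()
--
--     return answer
-- ===== SOURCE B (Python) =====
-- def solution(myString):
--     return myString.lower().replace('a', 'A')
-- ===== Notes on version B (the rewrite author's own statement) =====
-- stated objective: idiomatic
-- what changed: Replaces the explicit per-character loop with concatenation and branch by two whole-string library transforms: lower() once, then a single replace.
import Mathlib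
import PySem

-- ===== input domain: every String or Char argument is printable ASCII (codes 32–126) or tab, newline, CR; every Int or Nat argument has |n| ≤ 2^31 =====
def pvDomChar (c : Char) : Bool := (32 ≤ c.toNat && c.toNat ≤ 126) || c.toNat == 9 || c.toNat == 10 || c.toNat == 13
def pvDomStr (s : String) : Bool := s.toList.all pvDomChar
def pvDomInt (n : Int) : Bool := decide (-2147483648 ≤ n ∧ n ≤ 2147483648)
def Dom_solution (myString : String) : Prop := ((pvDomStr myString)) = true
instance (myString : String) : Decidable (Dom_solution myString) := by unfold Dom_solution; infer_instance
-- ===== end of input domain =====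

-- ===== PORT A =====
-- B replaces A's per-character loop (branch + concat) with two whole-string
-- transforms: lower the string once, then replace every 'a' with 'A'.
def solution (myString : String) : String :=
  String.ofList (myString.toList.foldl
    (fun answer c =>
      if PySem.Chars.lower [c] == ['a'] then answer ++ ['A']
      else answer ++ PySem.Chars.lower [c]) [])

-- ===== PORT B =====
def solution_alt (myString : String) : String :=
  PySem.Str.replace (PySem.Str.lower myString) "a" "A"

-- ===== PRECONDITION & SPEC =====
def Spec_solution (myString : String) (out : String) : Prop := out = solution_alt myString
instance (myString : String) (out : String) : Decidable (Spec_solution myString out) := by unfold Spec_solution; infer_instance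

-- ===== CLAIM (what is proved, stated in full; the proofs are below) =====
def Claim_equal_solution : Prop := ∀ (myString : String), Dom_solution myString → Spec_solution myString (solution myString)

-- ===== LEMMAS AND PROOFS =====

-- ===== VERDICT (by name: the statement is the Claim_ definition above) =====
-- the per-character mapping both programs compute
def pvMap (c : Char) : Char :=
  if PySem.Chars.lowerChar c = 'a' then 'A' else PySem.Chars.lowerChar c

theorem foldl_eq_map (l : List Char) (acc : List Char) :
    l.foldl (fun answer c =>
      if PySem.Chars.lower [c] == ['a'] then answer ++ ['A']
      else answer ++ PySem.Chars.lower [c]) acc = acc ++ l.map pvMap := by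
  induction l generalizing acc with
  | nil => simp
  | cons c t ih =>
    simp only [List.foldl_cons, ih, List.map_cons]
    by_cases h : PySem.Chars.lowerChar c = 'a' <;>
      simp [PySem.Chars.lower, pvMap, h]

theorem replace_go_single (l acc : List Char) (fuel : Nat) (hf : l.length ≤ fuel) :
    PySem.Chars.replace.go ['a'] ['A'] fuel l acc
      = acc.reverse ++ l.map (fun c => if c = 'a' then 'A' else c) := by
  induction l generalizing fuel acc with
  | nil => cases fuel <;> simp [PySem.Chars.replace.go]
  | cons c t ih =>
    cases fuel with
    | zero => simp at hf
    | succ n =>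
      simp only [PySem.Chars.replace.go]
      by_cases h : c = 'a'
      · have hp : List.isPrefixOf ['a'] (c :: t) = true := by
          simp [List.isPrefixOf, h]
        subst h
        rw [if_pos hp]
        rw [show List.drop (['a'] : List Char).length ('a' :: t) = t by simp]
        rw [ih _ _ (by simpa using Nat.le_of_succ_le_succ hf)]
        simp
      · have hp : List.isPrefixOf ['a'] (c :: t) = false := by
          simp [List.isPrefixOf]; exact fun e => h e.symm
        simp only [hp, Bool.false_eq_true, if_false]
        rw [ih _ _ (by simpa using Nat.le_of_succ_le_succ hf)]
        simp [h]

theorem solution_spec : Claim_equal_solution := by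
  intro s _
  unfold Spec_solution solution solution_alt PySem.Str.replace PySem.Str.lower
  rw [foldl_eq_map]
  simp only [PySem.Chars.replace, String.toList_ofList, List.nil_append]
  rw [show ((("a" : String).toList.isEmpty) = false) by decide]
  simp only [Bool.false_eq_true, if_false]
  rw [show ("a" : String).toList = ['a'] from rfl,
      show ("A" : String).toList = ['A'] from rfl]
  rw [replace_go_single _ _ _ (by simp [PySem.Chars.lower])]
  simp only [PySem.Chars.lower, List.map_map]
  exact congrArg String.ofList (List.map_congr_left fun c _ => by
    simp [pvMap, Function.comp])
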